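-- pv_equiv track=rewrite | github.com/ashiph-ui/MDM3_AirlineNetworkOptimisation | delay_implementation.py | get_destinations
-- ===== SOURCE A (Python) =====
-- def get_destinations(from_to):
--     destinations = {}
--     for i in range(len(from_to)):
--         if from_to[i][0] in destinations:
--             destinations[from_to[i][0]].append(from_to[i][1])
--         else:
--             destinations[from_to[i][0]] = [from_to[i][1]]
--     return destinations
-- ===== SOURCE B (Python) =====
-- def get_destinations(from_to):
--     keys = dict.fromkeys(src for src, _ in from_to)
--     return {k: [dst for src, dst in from_to if src == k] for k in keys}
-- ===== Notes on version B (the rewrite author's own statement) =====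
-- stated objective: alternative
-- what changed: Replaces the single conditional append/insert grouping pass with a keys-index (dict.fromkeys, first-appearance order) followed by one filtering scan of the list per distinct key.
import Mathlib
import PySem

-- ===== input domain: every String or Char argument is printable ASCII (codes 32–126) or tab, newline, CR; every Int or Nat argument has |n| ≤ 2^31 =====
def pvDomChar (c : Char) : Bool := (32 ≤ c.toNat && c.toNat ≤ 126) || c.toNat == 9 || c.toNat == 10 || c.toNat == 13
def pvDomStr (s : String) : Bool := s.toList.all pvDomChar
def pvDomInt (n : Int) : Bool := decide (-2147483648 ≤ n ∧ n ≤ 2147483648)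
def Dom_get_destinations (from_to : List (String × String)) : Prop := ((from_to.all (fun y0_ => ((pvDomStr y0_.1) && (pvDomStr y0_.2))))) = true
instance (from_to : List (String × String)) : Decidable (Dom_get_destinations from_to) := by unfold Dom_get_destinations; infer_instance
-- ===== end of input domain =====

-- B groups by a distinct-keys index plus one filtering scan per key instead of A's single
-- conditional append/insert pass; return values proved equal on all inputs.

-- ===== PORT A =====
def get_destinations (from_to : List (String × String)) : List (String × List String) :=
  ((PySem.List.pyRange 0 (PySem.List.len from_to) 1).foldl
      (fun d i =>
        if d.contains (PySem.List.pyGetD from_to i ("", "")).1 then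
          d.modify (PySem.List.pyGetD from_to i ("", "")).1 [] (· ++ [(PySem.List.pyGetD from_to i ("", "")).2])
        else
          d.insert (PySem.List.pyGetD from_to i ("", "")).1 [(PySem.List.pyGetD from_to i ("", "")).2])
      PySem.Dict.empty).items

-- ===== PORT B =====
def get_destinations_alt (from_to : List (String × String)) : List (String × List String) :=
  let keys : PySem.Set String := PySem.Set.ofList (from_to.map (·.1))
  keys.map (fun k => (k, (from_to.filter (fun p => p.1 == k)).map (·.2)))

-- ===== PRECONDITION & SPEC =====
def Spec_get_destinations (from_to : List (String × String)) (out : List (String × List String)) : Prop := out = get_destinations_alt from_to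
instance (from_to : List (String × String)) (out : List (String × List String)) : Decidable (Spec_get_destinations from_to out) := by unfold Spec_get_destinations; infer_instance

-- ===== CLAIM (what is proved, stated in full; the proofs are below) =====
def Claim_equal_get_destinations : Prop := ∀ (from_to : List (String × String)), Dom_get_destinations from_to → Spec_get_destinations from_to (get_destinations from_to)

-- ===== LEMMAS AND PROOFS =====

-- A's branchy loop step is exactly Dict.modify with default [].
theorem step_eq_modify (d : PySem.Dict String (List String)) (p : String × String) :
    (if d.contains p.1 then d.modify p.1 [] (· ++ [p.2]) else d.insert p.1 [p.2])
      = d.modify p.1 [] (· ++ [p.2]) := by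
  by_cases h : d.contains p.1
  · simp [h]
  · simp only [Bool.not_eq_true] at h
    simp [h, PySem.Dict.modify, PySem.Dict.getD_of_not_contains d [] h]

theorem dict_eq (from_to : List (String × String)) :
    (from_to.foldl (fun d p => d.modify p.1 [] (· ++ [p.2])) PySem.Dict.empty).items
      = get_destinations_alt from_to := by
  have hnd : (from_to.foldl (fun d p => d.modify p.1 [] (· ++ [p.2])) PySem.Dict.empty).keys.Nodup :=
    PySem.Dict.nodup_keys_foldl_modify_key from_to (·.1) [] (fun d p => (· ++ [p.2])) _
      PySem.Dict.nodup_keys_empty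
  rw [PySem.Dict.items_eq_map_keys _ hnd []]
  have hk : (from_to.foldl (fun d p => d.modify p.1 [] (· ++ [p.2])) PySem.Dict.empty).keys
      = PySem.Set.ofList (from_to.map (·.1)) := by
    rw [PySem.Dict.keys_foldl_modify_key from_to (fun p => p.1) [] (fun _ p v => v ++ [p.2]) PySem.Dict.empty]
    simp [PySem.Dict.keys_empty, PySem.Set.update_nil_left]
  rw [hk]
  unfold get_destinations_alt
  apply List.map_congr_left
  intro k _
  rw [PySem.Dict.getD_foldl_modify_append]
  simp [PySem.Dict.getD_empty]

-- ===== VERDICT (by name: the statement is the Claim_ definition above) =====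
theorem get_destinations_spec : Claim_equal_get_destinations := by
  intro from_to _
  unfold Spec_get_destinations get_destinations
  have hr := PySem.List.foldl_pyRange_pyGetD (xs := from_to)
    (f := fun d (p : String × String) =>
      if d.contains p.1 then d.modify p.1 [] (· ++ [p.2]) else d.insert p.1 [p.2])
    (d := ("", "")) (init := PySem.Dict.empty) (a := 0) (by norm_num)
  simp only [Int.toNat_zero, List.drop_zero] at hr
  rw [PySem.List.len] at hr ⊢
  rw [hr]
  have : from_to.foldl
      (fun d (p : String × String) =>
        if d.contains p.1 then d.modify p.1 [] (· ++ [p.2]) else d.insert p.1 [p.2])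
      PySem.Dict.empty
      = from_to.foldl (fun d p => d.modify p.1 [] (· ++ [p.2])) PySem.Dict.empty := by
    apply PySem.List.foldl_congr_mem
    intro d p _
    exact step_eq_modify d p
  rw [this, dict_eq]
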